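-- pv_equiv track=rewrite | github.com/wuwangyang24/MyzusDINOAdapt | VAE/utils.py | bin_eff
-- ===== SOURCE A (Python) =====
-- def bin_eff(y_eff, thresholds):
--     y_bin = []
--     thresholds = sorted(thresholds)
--     for number in y_eff:
--         bin_index = 0
--         for i, thres in enumerate(thresholds):
--             if number < thres:
--                 break
--             bin_index = i + 1
--         y_bin.append(bin_index)
--     return y_bin
-- ===== SOURCE B (Python) =====
-- def bin_eff(y_eff, thresholds):
--     # One pass per element over the unsorted thresholds: the bin index is just
--     # the number of thresholds <= the element, so no sort is needed.
--     return [sum(1 for t in thresholds if t <= n) for n in y_eff]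
-- ===== Notes on version B (the rewrite author's own statement) =====
-- stated objective: simpler
-- what changed: B drops the sort and the early-breaking scan entirely: the bin index equals the count of thresholds <= the element, computed by a direct count comprehension over the unsorted thresholds.
import Mathlib
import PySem

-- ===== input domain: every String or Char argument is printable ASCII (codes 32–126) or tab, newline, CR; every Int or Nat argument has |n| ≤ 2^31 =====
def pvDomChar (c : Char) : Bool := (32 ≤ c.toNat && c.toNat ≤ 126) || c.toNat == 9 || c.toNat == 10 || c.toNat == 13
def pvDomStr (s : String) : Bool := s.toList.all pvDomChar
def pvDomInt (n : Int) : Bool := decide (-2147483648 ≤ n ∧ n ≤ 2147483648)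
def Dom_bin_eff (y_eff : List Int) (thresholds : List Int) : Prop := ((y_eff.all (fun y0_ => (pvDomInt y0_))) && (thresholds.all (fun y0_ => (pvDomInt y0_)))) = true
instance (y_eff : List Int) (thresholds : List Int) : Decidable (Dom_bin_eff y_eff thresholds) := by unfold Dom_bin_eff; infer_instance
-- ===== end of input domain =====

-- B replaces A's sort + early-breaking indexed scan by a direct count of thresholds ≤ the
-- element over the unsorted list (objective: simpler; same return value, both total).

-- ===== PORT A =====
-- inner 'for i, thres in enumerate(thresholds): if number < thres: break; bin_index = i + 1'
def binEffInner (number : Int) : List (Int × Int) → Int → Int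
  | [], bin_index => bin_index
  | (i, thres) :: rest, bin_index =>
      if number < thres then bin_index else binEffInner number rest (i + 1)

def bin_eff (y_eff : List Int) (thresholds : List Int) : List Int :=
  let thresholds' := PySem.List.sorted thresholds (fun t => t) false
  y_eff.foldl (fun y_bin number =>
    y_bin ++ [binEffInner number (PySem.List.enumerate thresholds' 0) 0]) []

-- ===== PORT B =====
def bin_eff_alt (y_eff : List Int) (thresholds : List Int) : List Int :=
  y_eff.map (fun n => thresholds.foldl (fun acc t => if t ≤ n then acc + 1 else acc) 0)

-- ===== PRECONDITION & SPEC =====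
def Spec_bin_eff (y_eff : List Int) (thresholds : List Int) (out : List Int) : Prop := out = bin_eff_alt y_eff thresholds
instance (y_eff : List Int) (thresholds : List Int) (out : List Int) : Decidable (Spec_bin_eff y_eff thresholds out) := by unfold Spec_bin_eff; infer_instance

-- ===== CLAIM (what is proved, stated in full; the proofs are below) =====
def Claim_equal_bin_eff : Prop := ∀ (y_eff : List Int) (thresholds : List Int), Dom_bin_eff y_eff thresholds → Spec_bin_eff y_eff thresholds (bin_eff y_eff thresholds)

-- ===== LEMMAS AND PROOFS =====

-- A's inner break-loop on a nondecreasing list counts the elements ≤ number.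
theorem binEffInner_sorted (number : Int) (s : List Int)
    (hs : s.Pairwise (fun a b => a ≤ b)) (k : Int) :
    binEffInner number (PySem.List.enumerate s k) k
      = k + (s.countP (fun t => decide (t ≤ number)) : Int) := by
  induction s generalizing k with
  | nil => simp [PySem.List.enumerate_nil, binEffInner]
  | cons t rest ih =>
    rcases List.pairwise_cons.mp hs with ⟨hhead, hrest⟩
    rw [PySem.List.enumerate_cons]
    by_cases hlt : number < t
    · have hz : rest.countP (fun t => decide (t ≤ number)) = 0 := by
        rw [List.countP_eq_zero]
        intro y hy
        have := hhead y hy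
        simp only [decide_eq_true_eq]
        omega
      simp [binEffInner, hlt, hz]
    · have hle : t ≤ number := by omega
      simp only [binEffInner, if_neg hlt]
      rw [ih hrest (k + 1)]
      simp [hle]
      omega

theorem foldl_append_map (f : Int → Int) (ys : List Int) (acc : List Int) :
    ys.foldl (fun a n => a ++ [f n]) acc = acc ++ ys.map f := by
  induction ys generalizing acc with
  | nil => simp
  | cons y ys ih => simp [List.foldl_cons, ih]

-- ===== VERDICT (by name: the statement is the Claim_ definition above) =====
theorem bin_eff_spec : Claim_equal_bin_eff := by
  intro y_eff thresholds _
  unfold Spec_bin_eff bin_eff bin_eff_alt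
  rw [foldl_append_map]
  simp only [List.nil_append]
  apply List.map_congr_left
  intro n _
  rw [binEffInner_sorted n _ (PySem.List.sorted_pairwise thresholds (fun t => t)) 0]
  rw [PySem.List.foldl_ite_add_one]
  have hperm : (PySem.List.sorted thresholds (fun t => t) false).Perm thresholds :=
    PySem.List.sorted_perm thresholds (fun t => t) false
  rw [hperm.countP_eq]
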